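-- pv_equiv track=rewrite | github.com/rtress0001/Moneyback-codewars-leetcode | set of letters being the same.py | similarPairs
-- ===== SOURCE A (Python) =====
-- from typing import List
--
-- def similarPairs(words: List[str]) -> int:
--     set_letters = []
--     for ele in words:
--         set_letters.append(set(ele))
--
--     count = 0
--     n = len(words)
--
--     for i in range(n):
--         for j in range(i+1,n):
--             if set_letters[i]==set_letters[j]:
--                 count += 1
--
--     return count
-- ===== SOURCE B (Python) =====
-- from typing import List
--
-- def similarPairs(words: List[str]) -> int:
--     # One pass: group words by their canonical letter set; each new word
--     # pairs with every earlier word that has the same letter set.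
--     counter = {}
--     total = 0
--     for w in words:
--         k = tuple(sorted(set(w)))
--         c = counter.get(k, 0)
--         total += c
--         counter[k] = c + 1
--     return total
-- ===== Notes on version B (the rewrite author's own statement) =====
-- stated objective: faster
-- what changed: Replaces the O(n^2) all-pairs set comparison by a single pass that canonicalises each word's letter set to a sorted tuple and counts, via a hash-map counter, how many earlier words share that key.
import Mathlib
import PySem

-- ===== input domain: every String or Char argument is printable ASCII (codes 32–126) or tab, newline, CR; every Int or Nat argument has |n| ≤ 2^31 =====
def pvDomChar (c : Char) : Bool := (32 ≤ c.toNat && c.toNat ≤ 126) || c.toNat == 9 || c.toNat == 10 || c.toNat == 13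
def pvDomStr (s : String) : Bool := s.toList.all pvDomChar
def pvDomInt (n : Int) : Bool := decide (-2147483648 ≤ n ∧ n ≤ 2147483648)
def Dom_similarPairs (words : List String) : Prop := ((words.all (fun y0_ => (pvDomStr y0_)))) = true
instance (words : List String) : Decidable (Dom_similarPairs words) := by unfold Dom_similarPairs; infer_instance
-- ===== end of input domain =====

-- B replaces A's O(n^2) all-pairs set comparison with a single pass grouping words
-- by a canonical letter-set key in a hash-map counter (objective: faster).

-- ===== PORT A =====
def similarPairs (words : List String) : Int :=
  let set_letters : List (PySem.Set Char) :=
    words.foldl (fun acc ele => acc ++ [PySem.Set.ofList ele.toList]) []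
  let n : Int := PySem.List.len words
  (PySem.List.pyRange 0 n).foldl (fun count i =>
    (PySem.List.pyRange (i + 1) n).foldl (fun count j =>
      if PySem.Set.equal (PySem.List.pyGetD set_letters i [])
          (PySem.List.pyGetD set_letters j []) then count + 1 else count) count) 0

-- ===== PORT B =====
-- tuple(sorted(set(w))) : the canonical letter-set key
def pvKey (w : String) : List Char :=
  PySem.List.sorted (PySem.Set.ofList w.toList) (fun x => x)

def similarPairs_alt (words : List String) : Int :=
  (words.foldl
    (fun (st : PySem.Dict (List Char) Int × Int) w =>
      let k := pvKey w
      let c := st.1.getD k 0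
      (st.1.insert k (c + 1), st.2 + c))
    (PySem.Dict.empty, 0)).2

-- ===== PRECONDITION & SPEC =====
def Spec_similarPairs (words : List String) (out : Int) : Prop := out = similarPairs_alt words
instance (words : List String) (out : Int) : Decidable (Spec_similarPairs words out) := by unfold Spec_similarPairs; infer_instance

-- ===== CLAIM (what is proved, stated in full; the proofs are below) =====
def Claim_equal_similarPairs : Prop := ∀ (words : List String), Dom_similarPairs words → Spec_similarPairs words (similarPairs words)

-- ===== LEMMAS AND PROOFS =====

-- number of pairs i < j of equal sets, attributed to the EARLIER element
def pairsA : List (PySem.Set Char) → Int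
  | [] => 0
  | s :: t => (t.countP (fun u => PySem.Set.equal s u) : Int) + pairsA t

-- same count on canonical keys, attributed to the earlier element
def pairsKey : List (List Char) → Int
  | [] => 0
  | k :: t => (t.count k : Int) + pairsKey t

-- number of pairs attributed to the LATER element, with already-seen prefix p
def across (p : List (List Char)) : List (List Char) → Int
  | [] => 0
  | k :: t => (p.count k : Int) + across (p ++ [k]) t

lemma pyRange_shift (n : Nat) : ∀ (a b : Int), b - a ≤ n →
    PySem.List.pyRange (a + 1) (b + 1) = (PySem.List.pyRange a b).map (· + 1) := by
  induction n with
  | zero =>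
    intro a b h
    rw [PySem.List.pyRange_one_eq_nil (by omega), PySem.List.pyRange_one_eq_nil (by omega)]
    rfl
  | succ n ih =>
    intro a b h
    by_cases hab : a < b
    · rw [PySem.List.pyRange_one_cons (by omega), PySem.List.pyRange_one_cons hab,
        List.map_cons, ih (a + 1) b (by omega)]
    · rw [PySem.List.pyRange_one_eq_nil (by omega), PySem.List.pyRange_one_eq_nil (by omega)]
      rfl

lemma pyGetD_cons_succ {α : Type} (x : α) (xs : List α) (i : Int) (d : α) (h : 0 ≤ i) :
    PySem.List.pyGetD (x :: xs) (i + 1) d = PySem.List.pyGetD xs i d := by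
  rw [PySem.List.pyGetD_of_nonneg _ _ (by omega), PySem.List.pyGetD_of_nonneg _ _ h]
  have hi : (i + 1).toNat = i.toNat + 1 := by omega
  rw [hi, List.getD_cons_succ]

lemma pyGetD_cons_zero {α : Type} (x : α) (xs : List α) (d : α) :
    PySem.List.pyGetD (x :: xs) 0 d = x := by
  rw [PySem.List.pyGetD_of_nonneg _ _ le_rfl]
  rfl

-- Set.equal of the two letter sets is exactly equality of the canonical sorted keys
lemma equal_eq_key (v w : String) :
    PySem.Set.equal (PySem.Set.ofList v.toList) (PySem.Set.ofList w.toList)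
      = decide (pvKey v = pvKey w) := by
  have h : PySem.Set.equal (PySem.Set.ofList v.toList) (PySem.Set.ofList w.toList) = true
      ↔ pvKey v = pvKey w := by
    rw [PySem.Set.equal_iff]
    unfold pvKey
    rw [PySem.List.sorted_id_eq_sorted_id_iff_perm,
      List.perm_ext_iff_of_nodup (PySem.Set.nodup_ofList _) (PySem.Set.nodup_ofList _)]
  rw [Bool.eq_iff_iff, h, decide_eq_true_eq]

-- ---------- A's nested loops equal pairsA ----------

lemma sumG_eq_pairsA (ss : List (PySem.Set Char)) :
    ((PySem.List.pyRange 0 (PySem.List.len ss)).map (fun i =>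
      (((PySem.List.pyRange (i + 1) (PySem.List.len ss)).countP (fun j =>
        PySem.Set.equal (PySem.List.pyGetD ss i []) (PySem.List.pyGetD ss j []))) : Int))).sum
    = pairsA ss := by
  induction ss with
  | nil =>
    rw [show PySem.List.len ([] : List (PySem.Set Char)) = 0 from rfl,
      PySem.List.pyRange_one_eq_nil le_rfl]
    rfl
  | cons s t ih =>
    have hlen : PySem.List.len (s :: t) = PySem.List.len t + 1 := by
      simp [PySem.List.len]
    have hm : (0 : Int) ≤ PySem.List.len t := by simp [PySem.List.len]
    set m : Int := PySem.List.len t with hmdef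
    rw [hlen, PySem.List.pyRange_one_cons (by omega), List.map_cons, List.sum_cons]
    have hshift0 : PySem.List.pyRange (0 + 1) (m + 1) = (PySem.List.pyRange 0 m).map (· + 1) :=
      pyRange_shift (m.toNat) 0 m (by omega)
    -- head term: matches of s in t
    have hhead : (((PySem.List.pyRange (0 + 1) (m + 1)).countP (fun j =>
        PySem.Set.equal (PySem.List.pyGetD (s :: t) 0 []) (PySem.List.pyGetD (s :: t) j []))) : Int)
        = (t.countP (fun u => PySem.Set.equal s u) : Int) := by
      rw [hshift0, List.countP_map]
      have hc : List.countP
          ((fun j => PySem.Set.equal (PySem.List.pyGetD (s :: t) 0 []) (PySem.List.pyGetD (s :: t) j [])) ∘ (fun x => x + 1))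
          (PySem.List.pyRange 0 m)
          = List.countP (fun j => PySem.Set.equal s (PySem.List.pyGetD t j []))
          (PySem.List.pyRange 0 m) := by
        refine List.countP_congr (fun j hj => ?_)
        have hj' := PySem.List.mem_pyRange_one.mp hj
        simp only [Function.comp_apply]
        rw [pyGetD_cons_zero, pyGetD_cons_succ _ _ _ _ hj'.1]
      rw [hc]
      conv_rhs => rw [← PySem.List.map_pyGetD_pyRange_zero t []]
      rw [List.countP_map]
      rfl
    -- tail terms: shift indices by one
    have htail : (PySem.List.pyRange (0 + 1) (m + 1)).map (fun i =>
        (((PySem.List.pyRange (i + 1) (m + 1)).countP (fun j =>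
          PySem.Set.equal (PySem.List.pyGetD (s :: t) i []) (PySem.List.pyGetD (s :: t) j []))) : Int))
        = (PySem.List.pyRange 0 m).map (fun i =>
        (((PySem.List.pyRange (i + 1) m).countP (fun j =>
          PySem.Set.equal (PySem.List.pyGetD t i []) (PySem.List.pyGetD t j []))) : Int)) := by
      rw [hshift0, List.map_map]
      refine List.map_congr_left (fun i hi => ?_)
      have hi' := PySem.List.mem_pyRange_one.mp hi
      show (((PySem.List.pyRange (i + 1 + 1) (m + 1)).countP (fun j =>
          PySem.Set.equal (PySem.List.pyGetD (s :: t) (i + 1) []) (PySem.List.pyGetD (s :: t) j []))) : Int)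
          = _
      rw [pyRange_shift ((m - (i + 1)).toNat) (i + 1) m (by omega), List.countP_map]
      have hc : List.countP
          ((fun j => PySem.Set.equal (PySem.List.pyGetD (s :: t) (i + 1) []) (PySem.List.pyGetD (s :: t) j [])) ∘ (fun x => x + 1))
          (PySem.List.pyRange (i + 1) m)
          = List.countP (fun j => PySem.Set.equal (PySem.List.pyGetD t i []) (PySem.List.pyGetD t j []))
          (PySem.List.pyRange (i + 1) m) := by
        refine List.countP_congr (fun j hj => ?_)
        have hj' := PySem.List.mem_pyRange_one.mp hj
        simp only [Function.comp_apply]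
        rw [pyGetD_cons_succ _ _ _ _ hi'.1, pyGetD_cons_succ _ _ _ _ (by omega)]
      rw [hc]
    rw [hhead, htail, ih]
    rfl

lemma A_eq_pairsA (ss : List (PySem.Set Char)) :
    (PySem.List.pyRange 0 (PySem.List.len ss)).foldl (fun count i =>
      (PySem.List.pyRange (i + 1) (PySem.List.len ss)).foldl (fun count j =>
        if PySem.Set.equal (PySem.List.pyGetD ss i [])
            (PySem.List.pyGetD ss j []) then count + 1 else count) count) 0
    = pairsA ss := by
  rw [PySem.List.foldl_congr_mem _ _
    (fun count i => count + (((PySem.List.pyRange (i + 1) (PySem.List.len ss)).countP (fun j =>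
      PySem.Set.equal (PySem.List.pyGetD ss i []) (PySem.List.pyGetD ss j []))) : Int)) _
    (fun acc i _ => PySem.List.foldl_if_add_one _ _ acc)]
  rw [PySem.List.foldl_add, zero_add, sumG_eq_pairsA]

-- ---------- bridging pairsA (sets) to a key-count recursion ----------

lemma countP_equal_eq_count (s : String) (t : List String) :
    ((t.map (fun w => PySem.Set.ofList w.toList)).countP
      (fun u => PySem.Set.equal (PySem.Set.ofList s.toList) u) : Int)
    = ((t.map pvKey).count (pvKey s) : Int) := by
  rw [List.countP_map]
  unfold List.count
  rw [List.countP_map]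
  congr 1
  refine List.countP_congr (fun w _ => ?_)
  simp only [Function.comp_apply]
  rw [equal_eq_key]
  by_cases h : pvKey s = pvKey w
  · simp [h]
  · have h2 : ¬ pvKey w = pvKey s := fun hc => h hc.symm
    simp [h, h2]

lemma pairsA_eq_pairsKey (ws : List String) :
    pairsA (ws.map (fun w => PySem.Set.ofList w.toList))
    = pairsKey (ws.map pvKey) := by
  induction ws with
  | nil => rfl
  | cons s t ih =>
    show (((t.map (fun w => PySem.Set.ofList w.toList)).countP
        (fun u => PySem.Set.equal (PySem.Set.ofList s.toList) u)) : Int) + _ = _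
    rw [countP_equal_eq_count, ih]
    rfl

-- ---------- B's single pass equals across, and across equals pairsKey ----------

lemma sum_count_singleton (t : List (List Char)) (k : List Char) :
    (t.map fun x => (List.count x [k] : Int)).sum = (t.count k : Int) := by
  induction t with
  | nil => rfl
  | cons x t ih =>
    rw [List.map_cons, List.sum_cons, ih]
    by_cases h : x = k
    · subst h
      simp
      omega
    · have h2 : ¬ k = x := fun hc => h hc.symm
      simp [h, h2]

lemma across_split (ks : List (List Char)) : ∀ p : List (List Char),
    across p ks = (ks.map fun k => (p.count k : Int)).sum + across [] ks := by
  induction ks with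
  | nil => intro p; simp [across]
  | cons k t ih =>
    intro p
    simp only [across, List.nil_append, List.map_cons, List.sum_cons]
    rw [ih (p ++ [k]), ih [k]]
    have hsplit : (t.map fun x => ((p ++ [k]).count x : Int)).sum
        = (t.map fun x => (p.count x : Int)).sum + (t.map fun x => (List.count x [k] : Int)).sum := by
      rw [← PySem.List.sum_map_add_int]
      refine congrArg List.sum (List.map_congr_left (fun x _ => ?_))
      rw [List.count_append]
      push_cast
      ring
    rw [hsplit]
    simp only [List.count_nil, Nat.cast_zero]
    ring

lemma across_eq_pairsKey (ks : List (List Char)) : across [] ks = pairsKey ks := by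
  induction ks with
  | nil => rfl
  | cons k t ih =>
    simp only [across, List.nil_append, pairsKey]
    rw [across_split t [k], sum_count_singleton, ih]
    simp

lemma Bfold (ws : List String) : ∀ (p : List (List Char)) (tot : Int),
    (ws.foldl (fun (st : PySem.Dict (List Char) Int × Int) w =>
      (st.1.insert (pvKey w) (st.1.getD (pvKey w) 0 + 1), st.2 + st.1.getD (pvKey w) 0))
      (PySem.Dict.counter p, tot)).2 = tot + across p (ws.map pvKey) := by
  induction ws with
  | nil => intro p tot; simp [across]
  | cons w t ih =>
    intro p tot
    rw [List.foldl_cons]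
    have hins : (PySem.Dict.counter p).insert (pvKey w) ((PySem.Dict.counter p).getD (pvKey w) 0 + 1)
        = PySem.Dict.counter (p ++ [pvKey w]) := by
      rw [PySem.Dict.counter_append_singleton]
      exact (PySem.Dict.ext_iff.mpr rfl).symm
    rw [hins, PySem.Dict.getD_counter, ih]
    simp only [List.map_cons, across]
    ring

lemma B_eq_pairsKey (words : List String) :
    similarPairs_alt words = pairsKey (words.map pvKey) := by
  have h := Bfold words [] 0
  rw [zero_add, across_eq_pairsKey] at h
  exact h

-- ===== VERDICT (by name: the statement is the Claim_ definition above) =====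
theorem similarPairs_spec : Claim_equal_similarPairs := by
  intro words _
  show similarPairs words = similarPairs_alt words
  unfold similarPairs
  rw [PySem.List.foldl_append_singleton_eq_map (fun ele : String => PySem.Set.ofList ele.toList) words []]
  rw [List.nil_append]
  have hlen : PySem.List.len words
      = PySem.List.len (words.map (fun ele : String => PySem.Set.ofList ele.toList)) := by
    simp [PySem.List.len]
  rw [hlen, A_eq_pairsA, pairsA_eq_pairsKey, B_eq_pairsKey]
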